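-- pv_equiv track=rewrite | github.com/LRittes/materias | IA/trabs/sa/sa_v1.py | fo
-- ===== SOURCE A (Python) =====
-- def fo(sol, claus):
--     res = []
--     for clau in claus:
--         resClau = []
--         for c in clau:
--             if c < 0:
--                 resClau.append(bool(not sol[abs(c) - 1]))
--             else:
--                 resClau.append(bool(sol[c - 1]))
--         res.append(resClau)
--
--     amountTrue = 0
--     for r in res:
--         if r.count(True) > 0:
--             amountTrue += 1
--
--     return amountTrue
-- ===== SOURCE B (Python) =====
-- def fo(sol, claus):
--     n = len(sol)
--     sat = {c for c in range(-n, n + 1)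
--            if ((not sol[abs(c) - 1]) if c < 0 else sol[c - 1])} if n else set()
--     return sum(1 for clau in claus if not sat.isdisjoint(clau))
-- ===== Notes on version B (the rewrite author's own statement) =====
-- stated objective: alternative
-- what changed: Instead of evaluating every literal of every clause by indexing into sol and building a per-clause boolean table, B precomputes once the set of all satisfied literal values in [-n, n] and counts clauses by set disjointness against it.
import Mathlib
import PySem

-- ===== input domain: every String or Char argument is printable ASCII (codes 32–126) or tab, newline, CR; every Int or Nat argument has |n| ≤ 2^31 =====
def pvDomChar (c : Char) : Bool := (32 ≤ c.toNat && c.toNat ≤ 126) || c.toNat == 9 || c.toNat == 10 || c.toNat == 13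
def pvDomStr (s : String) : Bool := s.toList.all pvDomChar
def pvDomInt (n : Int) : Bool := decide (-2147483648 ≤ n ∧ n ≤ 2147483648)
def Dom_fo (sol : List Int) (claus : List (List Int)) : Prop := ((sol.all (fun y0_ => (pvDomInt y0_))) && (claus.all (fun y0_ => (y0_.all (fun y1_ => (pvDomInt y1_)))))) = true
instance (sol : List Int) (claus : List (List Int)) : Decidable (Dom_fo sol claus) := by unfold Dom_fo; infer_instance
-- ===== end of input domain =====

-- B replaces A's per-literal indexing into sol and its intermediate boolean table by the set of
-- all satisfied literal values in [-n, n], built once; clauses are then counted by set disjointness.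

-- ===== PORT A =====
-- builds the full res table of clause truth lists, then counts rows containing True
def fo (sol : List Int) (claus : List (List Int)) : Int :=
  (claus.foldl (fun res clau =>
    res ++ [clau.foldl (fun resClau c =>
      resClau ++ [if c < 0 then PySem.List.pyGetD sol (-c - 1) 0 == 0
                  else PySem.List.pyGetD sol (c - 1) 0 != 0]) []]) []).foldl
    (fun amountTrue r => if r.count true > 0 then amountTrue + 1 else amountTrue) 0

-- ===== PORT B =====
-- sat = {c in [-n, n] : literal c is satisfied by sol}; count clauses not disjoint from it
def fo_alt (sol : List Int) (claus : List (List Int)) : Int :=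
  let n : Int := sol.length
  let sat : PySem.Set Int :=
    if n ≠ 0 then
      PySem.Set.ofList ((PySem.List.pyRange (-n) (n + 1) 1).filter
        (fun c => if c < 0 then PySem.List.pyGetD sol (-c - 1) 0 == 0
                  else PySem.List.pyGetD sol (c - 1) 0 != 0))
    else PySem.Set.empty
  claus.foldl (fun acc clau =>
    acc + (if !PySem.Set.isdisjoint sat clau then 1 else 0)) 0

-- ===== PRECONDITION & SPEC =====
-- Pre_ excludes exactly the inputs where Python's sol[...] raises IndexError (a literal whose
-- index abs(c)-1, resp. c-1, falls outside sol).
def Pre_fo (sol : List Int) (claus : List (List Int)) : Prop :=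
  ∀ clau ∈ claus, ∀ c ∈ clau, PySem.Raise.InRange sol.length (if c < 0 then -c - 1 else c - 1)
instance (sol : List Int) (claus : List (List Int)) : Decidable (Pre_fo sol claus) := by unfold Pre_fo; infer_instance
def pvWitness_fo : List Int × List (List Int) := ([1, 0], [[1, -2], [2]])
def Spec_fo (sol : List Int) (claus : List (List Int)) (out : Int) : Prop := out = fo_alt sol claus
instance (sol : List Int) (claus : List (List Int)) (out : Int) : Decidable (Spec_fo sol claus out) := by unfold Spec_fo; infer_instance

-- ===== CLAIM (what is proved, stated in full; the proofs are below) =====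
def Claim_equal_fo : Prop := ∀ (sol : List Int) (claus : List (List Int)), Dom_fo sol claus → Pre_fo sol claus → Spec_fo sol claus (fo sol claus)

-- ===== LEMMAS AND PROOFS =====

-- the literal-truth test A computes, used only in the proofs
def pvLit (sol : List Int) (c : Int) : Bool :=
  if c < 0 then PySem.List.pyGetD sol (-c - 1) 0 == 0 else PySem.List.pyGetD sol (c - 1) 0 != 0

-- B's set of satisfied literal values (definitionally the 'let sat' of fo_alt)
def pvSat (sol : List Int) : PySem.Set Int :=
  if (sol.length : Int) ≠ 0 then
    PySem.Set.ofList ((PySem.List.pyRange (-(sol.length : Int)) ((sol.length : Int) + 1) 1).filter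
      (pvLit sol))
  else PySem.Set.empty

theorem pvInner (sol : List Int) (clau : List Int) (acc : List Bool) :
    clau.foldl (fun resClau c => resClau ++ [pvLit sol c]) acc = acc ++ clau.map (pvLit sol) := by
  induction clau generalizing acc with
  | nil => simp
  | cons c cs ih => simp [ih]

theorem pvOuter (sol : List Int) (claus : List (List Int)) (acc : List (List Bool)) :
    claus.foldl (fun res clau => res ++ [clau.foldl (fun resClau c => resClau ++ [pvLit sol c]) []]) acc
      = acc ++ claus.map (fun clau => clau.map (pvLit sol)) := by
  induction claus generalizing acc with
  | nil => simp
  | cons clau cls ih => rw [List.foldl_cons, ih, pvInner]; simp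

theorem pvCount (sol : List Int) (clau : List Int) :
    ((clau.map (pvLit sol)).count true > 0) ↔ clau.any (pvLit sol) = true := by
  simp only [gt_iff_lt, List.count_pos_iff, List.mem_map, List.any_eq_true]

-- for an in-range literal, membership in B's set is exactly A's literal truth
theorem pvMemSat (sol : List Int) (c : Int)
    (hin : PySem.Raise.InRange sol.length (if c < 0 then -c - 1 else c - 1)) :
    c ∈ pvSat sol ↔ pvLit sol c = true := by
  have hin' : -(sol.length : Int) ≤ (if c < 0 then -c - 1 else c - 1) ∧
      (if c < 0 then -c - 1 else c - 1) < (sol.length : Int) := by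
    simpa [PySem.Raise.InRange] using hin
  have hlen : (sol.length : Int) ≠ 0 := by
    by_cases hc : c < 0 <;> simp [hc] at hin' <;> omega
  unfold pvSat
  rw [if_pos hlen, PySem.Set.mem_ofList, List.mem_filter,
      PySem.List.mem_pyRange_one]
  have hrange : -(sol.length : Int) ≤ c ∧ c < (sol.length : Int) + 1 := by
    by_cases hc : c < 0 <;> simp [hc] at hin' <;> omega
  exact ⟨fun h => h.2, fun h => ⟨hrange, h⟩⟩

-- per clause: non-disjointness from B's set is A's "some literal true"
theorem pvClause (sol : List Int) (clau : List Int)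
    (h : ∀ c ∈ clau, PySem.Raise.InRange sol.length (if c < 0 then -c - 1 else c - 1)) :
    (!PySem.Set.isdisjoint (pvSat sol) clau) = clau.any (pvLit sol) := by
  by_cases hd : PySem.Set.isdisjoint (pvSat sol) clau = true
  · have hany : clau.any (pvLit sol) = false := by
      rw [List.any_eq_false]
      intro c hc hlit
      have hmem : c ∈ pvSat sol := (pvMemSat sol c (h c hc)).mpr hlit
      exact (PySem.Set.isdisjoint_iff _ _ |>.mp hd c hmem) hc
    rw [hd, hany]; rfl
  · have : ∃ x ∈ pvSat sol, x ∈ clau := by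
      by_contra hno
      exact hd ((PySem.Set.isdisjoint_iff _ _).mpr (fun x hx hxc => hno ⟨x, hx, hxc⟩))
    obtain ⟨x, hxs, hxc⟩ := this
    have hany : clau.any (pvLit sol) = true :=
      List.any_eq_true.mpr ⟨x, hxc, (pvMemSat sol x (h x hxc)).mp hxs⟩
    rw [Bool.of_not_eq_true hd, hany]; rfl

theorem pvFold (sol : List Int) (claus : List (List Int))
    (h : ∀ clau ∈ claus, ∀ c ∈ clau, PySem.Raise.InRange sol.length (if c < 0 then -c - 1 else c - 1)) (a : Int) :
    (claus.map (fun clau => clau.map (pvLit sol))).foldl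
        (fun amountTrue r => if r.count true > 0 then amountTrue + 1 else amountTrue) a
      = claus.foldl (fun acc clau => acc + (if !PySem.Set.isdisjoint (pvSat sol) clau then 1 else 0)) a := by
  induction claus generalizing a with
  | nil => rfl
  | cons clau cls ih =>
    simp only [List.map_cons, List.foldl_cons]
    rw [ih (fun cl hcl => h cl (List.mem_cons_of_mem _ hcl))]
    congr 1
    simp only [pvClause sol clau (h clau List.mem_cons_self)]
    by_cases hb : clau.any (pvLit sol) = true
    · rw [if_pos ((pvCount sol clau).mpr hb), hb]
      simp
    · rw [if_neg (fun hcnt => hb ((pvCount sol clau).mp hcnt)), Bool.of_not_eq_true hb]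
      simp

-- ===== VERDICT (by name: the statement is the Claim_ definition above) =====
theorem fo_spec : Claim_equal_fo := by
  intro sol claus _ hpre
  unfold Spec_fo fo fo_alt
  show (claus.foldl (fun res clau => res ++ [clau.foldl (fun resClau c => resClau ++ [pvLit sol c]) []]) []).foldl
      (fun (amountTrue : Int) r => if r.count true > 0 then amountTrue + 1 else amountTrue) 0
    = claus.foldl (fun (acc : Int) clau => acc + (if !PySem.Set.isdisjoint (pvSat sol) clau then 1 else 0)) 0
  rw [pvOuter]
  simpa using pvFold sol claus hpre 0
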